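-- pv_equiv track=rewrite | github.com/ligeaaa/CommunityDetection | common/util/check/get_dataset_information.py | is_overlapping_community
-- ===== SOURCE A (Python) =====
-- def is_overlapping_community(truth_table):
--     """
--     Determines whether the given community structure in `truth_table` represents overlapping communities.
--     """
--     node_to_communities = {}
--     for node, community in truth_table:
--         if node not in node_to_communities:
--             node_to_communities[node] = set()
--         node_to_communities[node].add(community)
--
--     for communities in node_to_communities.values():
--         if len(communities) > 1:
--             return True
--     return False
-- ===== SOURCE B (Python) =====
-- def is_overlapping_community(truth_table):
--     first = {}
--     for node, community in truth_table:
--         c0 = first.get(node)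
--         if c0 is None:
--             first[node] = community
--         elif c0 != community:
--             return True
--     return False
-- ===== Notes on version B (the rewrite author's own statement) =====
-- stated objective: simpler
-- what changed: Replaces the dict-of-sets build plus a separate scan over the sets by a single streaming pass that stores only the first community seen per node and returns True immediately on the first mismatch.
import Mathlib
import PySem

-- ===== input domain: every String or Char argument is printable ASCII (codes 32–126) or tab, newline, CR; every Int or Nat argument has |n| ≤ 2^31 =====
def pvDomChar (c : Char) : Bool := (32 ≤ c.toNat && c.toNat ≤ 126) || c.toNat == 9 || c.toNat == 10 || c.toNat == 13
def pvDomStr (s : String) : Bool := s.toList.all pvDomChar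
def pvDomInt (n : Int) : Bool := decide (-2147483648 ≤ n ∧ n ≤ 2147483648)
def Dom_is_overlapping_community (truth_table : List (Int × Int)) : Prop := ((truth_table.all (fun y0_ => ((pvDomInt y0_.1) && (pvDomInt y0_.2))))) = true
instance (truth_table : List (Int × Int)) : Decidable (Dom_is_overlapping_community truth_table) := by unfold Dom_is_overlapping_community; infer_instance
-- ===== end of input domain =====

-- B is a simpler single streaming pass keeping one scalar (first community) per node with an
-- early exit, instead of A's dict-of-sets build followed by a separate scanning loop.

-- ===== PORT A =====
-- one iteration of A's first loop: ensure the node has a set, then add the community to it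
def pvStepA (d : PySem.Dict Int (PySem.Set Int)) (p : Int × Int) : PySem.Dict Int (PySem.Set Int) :=
  let d1 := if d.contains p.1 then d else d.insert p.1 PySem.Set.empty
  d1.modify p.1 PySem.Set.empty (fun s => PySem.Set.add s p.2)

def is_overlapping_community (truth_table : List (Int × Int)) : Bool :=
  let node_to_communities := truth_table.foldl pvStepA PySem.Dict.empty
  -- second loop: return True as soon as some set has more than one element
  node_to_communities.values.any (fun s => decide (1 < PySem.Set.len s))

-- ===== PORT B =====
-- B's loop: seen maps each node to the first community observed; early return on a mismatch
def pvGoAlt (seen : PySem.Dict Int Int) : List (Int × Int) → Bool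
  | [] => false
  | (n, c) :: t =>
    match seen.get? n with
    | none => pvGoAlt (seen.insert n c) t
    | some c0 => if c0 ≠ c then true else pvGoAlt seen t

def is_overlapping_community_alt (truth_table : List (Int × Int)) : Bool :=
  pvGoAlt PySem.Dict.empty truth_table

-- ===== PRECONDITION & SPEC =====
def Spec_is_overlapping_community (truth_table : List (Int × Int)) (out : Bool) : Prop := out = is_overlapping_community_alt truth_table
instance (truth_table : List (Int × Int)) (out : Bool) : Decidable (Spec_is_overlapping_community truth_table out) := by unfold Spec_is_overlapping_community; infer_instance

-- ===== CLAIM (what is proved, stated in full; the proofs are below) =====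
def Claim_equal_is_overlapping_community : Prop := ∀ (truth_table : List (Int × Int)), Dom_is_overlapping_community truth_table → Spec_is_overlapping_community truth_table (is_overlapping_community truth_table)

-- ===== LEMMAS AND PROOFS =====

-- the two loop states correspond: seen n = some c ↔ A's dict maps n to the set {c}
def pvInv (seen : PySem.Dict Int Int) (d : PySem.Dict Int (PySem.Set Int)) : Prop :=
  d.keys.Nodup ∧
  ∀ n : Int, (seen.get? n = none ∧ d.get? n = none) ∨
             (∃ c, seen.get? n = some c ∧ d.get? n = some [c])

lemma pvModify_eq_insert (d : PySem.Dict Int (PySem.Set Int)) (k : Int) (d0 : PySem.Set Int)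
    (f : PySem.Set Int → PySem.Set Int) : d.modify k d0 f = d.insert k (f (d.getD k d0)) := rfl

lemma pvLen_add_ge (s : PySem.Set Int) (x : Int) : PySem.Set.len s ≤ PySem.Set.len (PySem.Set.add s x) := by
  simp only [PySem.Set.len, PySem.Set.add]
  split <;> simp

-- a conflict (a set with two elements) already in the dict survives the rest of A's fold
lemma pvConflictMono (l : List (Int × Int)) :
    ∀ d : PySem.Dict Int (PySem.Set Int),
      (∃ k s, d.get? k = some s ∧ 1 < PySem.Set.len s) →
      ∃ k s, (l.foldl pvStepA d).get? k = some s ∧ 1 < PySem.Set.len s := by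
  induction l with
  | nil => intro d h; simpa using h
  | cons p t ih =>
    rintro d ⟨k, s, hget, hlen⟩
    simp only [List.foldl_cons]
    apply ih
    by_cases hk : k = p.1
    · subst hk
      have hc : d.contains p.1 = true := by
        rw [PySem.Dict.contains_eq_isSome_get?, hget]; rfl
      refine ⟨p.1, PySem.Set.add s p.2, ?_, lt_of_lt_of_le hlen (pvLen_add_ge s p.2)⟩
      simp [pvStepA, hc, pvModify_eq_insert, PySem.Dict.get?_insert_self,
        PySem.Dict.getD_eq_get?_getD, hget]
    · refine ⟨k, s, ?_, hlen⟩
      simp only [pvStepA, pvModify_eq_insert]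
      split
      · rw [PySem.Dict.get?_insert_of_ne _ _ hk, hget]
      · rw [PySem.Dict.get?_insert_of_ne _ _ hk,
          PySem.Dict.get?_insert_of_ne _ _ hk, hget]

lemma pvAnyOfGet (d : PySem.Dict Int (PySem.Set Int)) (k : Int) (s : PySem.Set Int)
    (hget : d.get? k = some s) (hlen : 1 < PySem.Set.len s) :
    d.values.any (fun s => decide (1 < PySem.Set.len s)) = true := by
  have hmem : (k, s) ∈ d.items := PySem.Dict.mem_items_of_get?_eq_some d hget
  refine List.any_eq_true.mpr ⟨s, ?_, by simpa using hlen⟩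
  simp only [PySem.Dict.values]
  exact List.mem_map.mpr ⟨(k, s), hmem, rfl⟩

-- main invariant lemma: under pvInv, B's loop from `seen` computes exactly A's answer
-- continued from dict `d`
lemma pvMain (l : List (Int × Int)) :
    ∀ (seen : PySem.Dict Int Int) (d : PySem.Dict Int (PySem.Set Int)), pvInv seen d →
      pvGoAlt seen l = (l.foldl pvStepA d).values.any (fun s => decide (1 < PySem.Set.len s)) := by
  induction l with
  | nil =>
    rintro seen d ⟨hnd, hinv⟩
    simp only [List.foldl_nil, pvGoAlt]
    symm
    rw [List.any_eq_false]
    intro v hv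
    obtain ⟨⟨k, v'⟩, hmem, rfl⟩ := List.mem_map.mp hv
    have hget : d.get? k = some v' := PySem.Dict.get?_of_mem_items d hmem hnd
    rcases hinv k with ⟨_, h0⟩ | ⟨c, _, h1⟩
    · rw [hget] at h0; cases h0
    · rw [hget] at h1
      cases Option.some.inj h1
      simp [PySem.Set.len]
  | cons p t ih =>
    rintro seen d hinv
    obtain ⟨n, c⟩ := p
    obtain ⟨hnd, hc⟩ := hinv
    rcases hc n with ⟨hs, hd⟩ | ⟨c0, hs, hd⟩
    · -- node unseen: both sides record it
      simp only [List.foldl_cons, pvGoAlt, hs]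
      have hcont : d.contains n = false := by
        rw [PySem.Dict.contains_eq_isSome_get?, hd]; rfl
      have hstep : pvStepA d (n, c) = (d.insert n PySem.Set.empty).insert n (PySem.Set.add PySem.Set.empty c) := by
        simp [pvStepA, hcont, pvModify_eq_insert, PySem.Dict.getD_insert_self]
      apply ih
      constructor
      · rw [hstep, PySem.Dict.keys_insert_of_contains _ _ (PySem.Dict.contains_insert_self _ _ _)]
        exact PySem.Dict.nodup_keys_insert _ _ _ hnd
      · intro m
        by_cases hm : m = n
        · subst hm
          right
          exact ⟨c, PySem.Dict.get?_insert_self _ _ _, by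
            rw [hstep, PySem.Dict.get?_insert_self]; rfl⟩
        · rcases hc m with ⟨hs', hd'⟩ | ⟨c1, hs', hd'⟩
          · left
            rw [hstep, PySem.Dict.get?_insert_of_ne _ _ hm,
              PySem.Dict.get?_insert_of_ne _ _ hm,
              PySem.Dict.get?_insert_of_ne _ _ hm]
            exact ⟨hs', hd'⟩
          · right
            refine ⟨c1, ?_, ?_⟩
            · rw [PySem.Dict.get?_insert_of_ne _ _ hm]; exact hs'
            · rw [hstep, PySem.Dict.get?_insert_of_ne _ _ hm,
                PySem.Dict.get?_insert_of_ne _ _ hm]; exact hd'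
    · -- node already seen with first community c0
      simp only [List.foldl_cons, pvGoAlt, hs]
      have hcont : d.contains n = true := by
        rw [PySem.Dict.contains_eq_isSome_get?, hd]; rfl
      have hstep : pvStepA d (n, c) = d.insert n (PySem.Set.add [c0] c) := by
        simp [pvStepA, hcont, pvModify_eq_insert, PySem.Dict.getD_eq_get?_getD, hd]
      by_cases hne : c0 = c
      · -- repeat of the same community: A's set is unchanged as a value
        subst hne
        rw [if_neg (show ¬(c0 ≠ c0) by simp)]
        have hadd : PySem.Set.add [c0] c0 = [c0] := by simp [PySem.Set.add, PySem.Set.contains]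
        apply ih
        refine ⟨?_, ?_⟩
        · rw [hstep, PySem.Dict.keys_insert_of_contains _ _ hcont]; exact hnd
        · intro m
          by_cases hm : m = n
          · subst hm
            right
            exact ⟨c0, hs, by rw [hstep, PySem.Dict.get?_insert_self, hadd]⟩
          · rw [hstep, PySem.Dict.get?_insert_of_ne _ _ hm]
            exact hc m
      · -- conflict: B returns True now; A's set at n has grown to two elements and survives
        rw [if_pos hne]
        have hadd : PySem.Set.add [c0] c = [c0, c] := by
          simp [PySem.Set.add, PySem.Set.contains, Ne.symm hne]
        have hconf : ∃ k s, (pvStepA d (n, c)).get? k = some s ∧ 1 < PySem.Set.len s := by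
          refine ⟨n, [c0, c], ?_, by norm_num [PySem.Set.len]⟩
          rw [hstep, hadd, PySem.Dict.get?_insert_self]
        obtain ⟨k, s, hg, hl⟩ := pvConflictMono t _ hconf
        exact (pvAnyOfGet _ k s hg hl).symm

-- ===== VERDICT (by name: the statement is the Claim_ definition above) =====
theorem is_overlapping_community_spec : Claim_equal_is_overlapping_community := by
  intro tt _
  unfold Spec_is_overlapping_community is_overlapping_community is_overlapping_community_alt
  symm
  apply pvMain
  exact ⟨PySem.Dict.nodup_keys_empty, fun n => Or.inl ⟨rfl, rfl⟩⟩
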